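-- pv_equiv track=rewrite | github.com/Mayra1903/mayra321 | ssrrttf.py | Key
-- ===== SOURCE A (Python) =====
-- def Key(proNo,count,t,burst={},e1=[]):
--   i=0
--   if proNo==99:
--     for index in range (int(count)):
--       if(t>=burst.get(e1[index])[0]):
--         proNo=e1[index]
--         break
--   if proNo!=99:
--     for index2 in range (int(count)):
--       if(t>=burst.get(e1[index2])[0]):
--         if(burst.get(e1[index2])[1]<burst.get(proNo)[1]):
--           proNo=e1[index2]
--   return proNo
-- ===== SOURCE B (Python) =====
-- def Key(proNo, count, t, burst={}, e1=[]):
--     # divide-and-conquer tournament: champ(lo, hi) returns the arrived process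
--     # with the smallest burst time among e1[lo:hi] (leftmost on ties), or None
--     def better(p, q):
--         return p if burst.get(p)[1] <= burst.get(q)[1] else q
--
--     def champ(lo, hi):
--         if hi - lo == 1:
--             p = e1[lo]
--             return p if t >= burst.get(p)[0] else None
--         mid = (lo + hi) // 2
--         left = champ(lo, mid)
--         right = champ(mid, hi)
--         if left is None:
--             return right
--         if right is None:
--             return left
--         return better(left, right)
--
--     n = int(count)
--     best = champ(0, n) if n > 0 else None
--     if proNo != 99 and best is not None:
--         best = better(proNo, best)
--     return best if best is not None else proNo
-- ===== Notes on version B (the rewrite author's own statement) =====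
-- stated objective: alternative
-- what changed: A's seed-then-refine pair of linear index loops is replaced by a divide-and-conquer tournament: champ(lo,hi) recursively halves the index range, returns the arrived process with smallest burst time in each half (None if none arrived), merges the two halves with a left-biased better(), and the incoming proNo (when not 99) is merged in once at the top.
-- intended difference: When proNo is the idle sentinel 99 and the first arrived process is itself numbered 99 while a later arrived process has strictly smaller burst time, A's 'proNo != 99' guard skips the selection loop and returns 99, whereas B returns the arrived process with the smallest burst time, which is the intended shortest-job selection. — e.g. on Key(99, 2, 0, [(99, [0, 5]), (1, [0, 1])], [99, 1]): A returns 99, B returns 1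
-- outside the precondition, e.g. on Key(99, 4, 4, {0: [0, 3], 99: [3, 1]}, [99]): A returns 99, B raises IndexError
import Mathlib
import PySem

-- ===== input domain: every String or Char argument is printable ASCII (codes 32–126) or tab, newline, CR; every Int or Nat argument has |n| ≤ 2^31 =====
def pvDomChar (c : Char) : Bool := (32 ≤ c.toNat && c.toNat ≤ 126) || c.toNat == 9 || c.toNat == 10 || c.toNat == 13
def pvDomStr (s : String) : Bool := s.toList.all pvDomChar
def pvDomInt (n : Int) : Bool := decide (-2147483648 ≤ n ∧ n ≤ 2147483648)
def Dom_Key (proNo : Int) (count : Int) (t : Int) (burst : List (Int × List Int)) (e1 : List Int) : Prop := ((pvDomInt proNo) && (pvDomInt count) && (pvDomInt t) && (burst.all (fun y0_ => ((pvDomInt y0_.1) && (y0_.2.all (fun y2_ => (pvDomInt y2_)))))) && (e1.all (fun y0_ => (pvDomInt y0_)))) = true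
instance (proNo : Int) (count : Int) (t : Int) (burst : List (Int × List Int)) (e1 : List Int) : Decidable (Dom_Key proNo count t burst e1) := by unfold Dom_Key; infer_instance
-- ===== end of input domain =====

-- B replaces A's seed-then-refine pair of linear loops by a divide-and-conquer tournament over the index range; return-value equivalence is proved outside D_Key.

-- shared accessors for the Python expressions burst.get(x)[0], burst.get(x)[1], e1[i]
-- (the .getD defaults are only reached where the Python raises, i.e. outside Pre_Key)
def pvEnt (burst : List (Int × List Int)) (p : Int) : List Int :=
  (PySem.Dict.get? (PySem.Dict.mk burst) p).getD []
def pvB0 (burst : List (Int × List Int)) (p : Int) : Int :=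
  (PySem.List.pyGet? (pvEnt burst p) 0).getD 0
def pvB1 (burst : List (Int × List Int)) (p : Int) : Int :=
  (PySem.List.pyGet? (pvEnt burst p) 1).getD 0
def pvAt (e1 : List Int) (i : Nat) : Int :=
  (PySem.List.pyGet? e1 (i : Int)).getD 0
def pvAtI (e1 : List Int) (i : Int) : Int :=
  (PySem.List.pyGet? e1 i).getD 0

-- ===== PORT A =====
-- first loop (find first arrived, break) as find?; second loop as a foldl over the same index range
def Key (proNo : Int) (count : Int) (t : Int) (burst : List (Int × List Int)) (e1 : List Int) : Int :=
  let proNo1 : Int :=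
    if proNo = 99 then
      match (List.range count.toNat).find? (fun i => decide (t ≥ pvB0 burst (pvAt e1 i))) with
      | some i => pvAt e1 i
      | none => proNo
    else proNo
  if proNo1 ≠ 99 then
    (List.range count.toNat).foldl (fun cand i =>
      if t ≥ pvB0 burst (pvAt e1 i) then
        if pvB1 burst (pvAt e1 i) < pvB1 burst cand then pvAt e1 i else cand
      else cand) proNo1
  else proNo1

-- ===== PORT B =====
-- better(p, q): the process with the smaller burst time, the left one on ties
def pvBetter (burst : List (Int × List Int)) (p q : Int) : Int :=
  if pvB1 burst p ≤ pvB1 burst q then p else q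

-- champ(lo, hi): the arrived process with smallest burst among e1[lo:hi] (leftmost on ties), none if no one arrived
-- (the fuel argument and the 'hi - lo <= 0' guard only make the recursion total and kernel-reducible;
-- pvChamp passes fuel = range size, which Python's recursion never exhausts, and Python never calls champ on an empty range)
def pvChampF (t : Int) (burst : List (Int × List Int)) (e1 : List Int) : Nat → Int → Int → Option Int
  | 0, _, _ => none
  | fuel + 1, lo, hi =>
    if hi - lo ≤ 0 then none
    else if hi - lo = 1 then
      let p := pvAtI e1 lo
      if t ≥ pvB0 burst p then some p else none
    else
      let mid := PySem.Int.floordiv (lo + hi) 2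
      match pvChampF t burst e1 fuel lo mid, pvChampF t burst e1 fuel mid hi with
      | none, r => r
      | some l, none => some l
      | some l, some r => some (pvBetter burst l r)

def pvChamp (t : Int) (burst : List (Int × List Int)) (e1 : List Int) (lo hi : Int) : Option Int :=
  pvChampF t burst e1 (hi - lo).toNat lo hi

def Key_alt (proNo : Int) (count : Int) (t : Int) (burst : List (Int × List Int)) (e1 : List Int) : Int :=
  let best : Option Int := if 0 < count then pvChamp t burst e1 0 count else none
  let best2 : Option Int :=
    if proNo ≠ 99 then
      match best with
      | some b => some (pvBetter burst proNo b)
      | none => none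
    else best
  match best2 with
  | some b => b
  | none => proNo

-- ===== PRECONDITION & SPEC =====
-- entry for x exists, has an element 0, and an element 1 if x is arrived at time t
def pvEntryOk (t : Int) (burst : List (Int × List Int)) (x : Int) : Bool :=
  match PySem.Dict.get? (PySem.Dict.mk burst) x with
  | none => false
  | some l => decide (1 ≤ l.length) && (!decide (t ≥ pvB0 burst x) || decide (2 ≤ l.length))
def pvKeyOk (burst : List (Int × List Int)) (x : Int) : Bool :=
  match PySem.Dict.get? (PySem.Dict.mk burst) x with
  | none => false
  | some l => decide (2 ≤ l.length)
-- Pre_Key = the inputs where Python A returns: enough processes in e1, every scanned process has a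
-- burst entry (with its completion component when arrived), and proNo's entry when the selection
-- loop compares against it. Narrowing: when proNo = 99 and the FIRST arrived process id is 99, A
-- returns early without reading the remaining entries, so A also returns on some inputs whose later
-- entries are missing/short or whose e1 is shorter than count; those are excluded (B reads them all).
def Pre_Key (proNo : Int) (count : Int) (t : Int) (burst : List (Int × List Int)) (e1 : List Int) : Prop :=
  count.toNat ≤ e1.length ∧
  (∀ i < count.toNat, pvEntryOk t burst (pvAt e1 i) = true) ∧
  ((proNo ≠ 99 ∧ ∃ i < count.toNat, t ≥ pvB0 burst (pvAt e1 i)) → pvKeyOk burst proNo = true)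
instance (proNo : Int) (count : Int) (t : Int) (burst : List (Int × List Int)) (e1 : List Int) : Decidable (Pre_Key proNo count t burst e1) := by unfold Pre_Key; infer_instance
def pvWitness_Key : Int × Int × Int × (List (Int × List Int)) × List Int :=
  (1, 1, 5, [(2, [0, 3]), (1, [0, 4])], [2])
-- When proNo = 99 and the first arrived process is itself numbered 99 while a later arrived process
-- has strictly smaller burst time, A returns 99 (its sentinel guard skips the selection loop); B
-- returns the arrived process with smallest burst time, the intended shortest-job choice.
def D_Key (proNo : Int) (count : Int) (t : Int) (burst : List (Int × List Int)) (e1 : List Int) : Prop :=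
  proNo = 99 ∧ ∃ i < count.toNat,
    t ≥ pvB0 burst (pvAt e1 i) ∧ pvAt e1 i = 99 ∧
    (∀ j < i, ¬ t ≥ pvB0 burst (pvAt e1 j)) ∧
    ∃ j < count.toNat, i < j ∧ t ≥ pvB0 burst (pvAt e1 j) ∧ pvB1 burst (pvAt e1 j) < pvB1 burst 99
instance (proNo : Int) (count : Int) (t : Int) (burst : List (Int × List Int)) (e1 : List Int) : Decidable (D_Key proNo count t burst e1) := by unfold D_Key; infer_instance
def Spec_Key (proNo : Int) (count : Int) (t : Int) (burst : List (Int × List Int)) (e1 : List Int) (out : Int) : Prop := ¬ D_Key proNo count t burst e1 → out = Key_alt proNo count t burst e1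
instance (proNo : Int) (count : Int) (t : Int) (burst : List (Int × List Int)) (e1 : List Int) (out : Int) : Decidable (Spec_Key proNo count t burst e1 out) := by unfold Spec_Key; infer_instance
def pvDiffWitness_Key : Int × Int × Int × (List (Int × List Int)) × List Int :=
  (99, 2, 0, [(99, [0, 5]), (1, [0, 1])], [99, 1])
def pvDiffWitnessOut_Key : Int × Int := (99, 1)

-- ===== CLAIM (what is proved, stated in full; the proofs are below) =====
def Claim_unchanged_Key : Prop := ∀ (proNo : Int) (count : Int) (t : Int) (burst : List (Int × List Int)) (e1 : List Int), Dom_Key proNo count t burst e1 → Pre_Key proNo count t burst e1 → Spec_Key proNo count t burst e1 (Key proNo count t burst e1)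
def Claim_changed_Key : Prop := Dom_Key (pvDiffWitness_Key.1) (pvDiffWitness_Key.2.1) (pvDiffWitness_Key.2.2.1) (pvDiffWitness_Key.2.2.2.1) (pvDiffWitness_Key.2.2.2.2) ∧ Pre_Key (pvDiffWitness_Key.1) (pvDiffWitness_Key.2.1) (pvDiffWitness_Key.2.2.1) (pvDiffWitness_Key.2.2.2.1) (pvDiffWitness_Key.2.2.2.2) ∧ D_Key (pvDiffWitness_Key.1) (pvDiffWitness_Key.2.1) (pvDiffWitness_Key.2.2.1) (pvDiffWitness_Key.2.2.2.1) (pvDiffWitness_Key.2.2.2.2) ∧ Key (pvDiffWitness_Key.1) (pvDiffWitness_Key.2.1) (pvDiffWitness_Key.2.2.1) (pvDiffWitness_Key.2.2.2.1) (pvDiffWitness_Key.2.2.2.2) = pvDiffWitnessOut_Key.1 ∧ Key_alt (pvDiffWitness_Key.1) (pvDiffWitness_Key.2.1) (pvDiffWitness_Key.2.2.1) (pvDiffWitness_Key.2.2.2.1) (pvDiffWitness_Key.2.2.2.2) = pvDiffWitnessOut_Key.2 ∧ pvDiffWitnessOut_Key.1 ≠ pvDiffWitnessOut_Key.2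
def Claim_exact_Key : Prop := ∀ (proNo : Int) (count : Int) (t : Int) (burst : List (Int × List Int)) (e1 : List Int), Dom_Key proNo count t burst e1 → Pre_Key proNo count t burst e1 → D_Key proNo count t burst e1 → Key proNo count t burst e1 ≠ Key_alt proNo count t burst e1

-- ===== LEMMAS AND PROOFS =====

-- the running first-minimum loop A's selection pass computes
def pvFM (k : Int → Int) (cand : Int) (l : List Int) : Int :=
  l.foldl (fun c x => if k x < k c then x else c) cand

theorem pvFM_nil (k : Int → Int) (c : Int) : pvFM k c [] = c := rfl

theorem pvFM_cons (k : Int → Int) (c x : Int) (l : List Int) :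
    pvFM k c (x :: l) = pvFM k (if k x < k c then x else c) l := rfl

theorem pvFM_stay (k : Int → Int) (c : Int) (l : List Int)
    (h : ∀ x ∈ l, ¬ k x < k c) : pvFM k c l = c := by
  induction l with
  | nil => rfl
  | cons x tl ih =>
    rw [pvFM_cons, if_neg (h x (by simp))]
    exact ih (fun y hy => h y (by simp [hy]))

-- prepending a candidate to a first-minimum
theorem pvFM_split (k : Int → Int) (m c : Int) (l : List Int) :
    pvFM k m (c :: l) = if k (pvFM k c l) < k m then pvFM k c l else m := by
  induction l generalizing m c with
  | nil => simp [pvFM_cons, pvFM_nil]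
  | cons x tl ih =>
    rw [pvFM_cons k m c, ih, ih c x]
    split_ifs <;> omega

theorem pvFM_le (k : Int → Int) (c : Int) (l : List Int) :
    ∀ x ∈ c :: l, k (pvFM k c l) ≤ k x := by
  induction l generalizing c with
  | nil =>
    intro x hx
    rw [pvFM_nil]
    rcases List.mem_singleton.mp hx with rfl
    exact le_refl _
  | cons y tl ih =>
    intro x hx
    rw [pvFM_cons]
    have hm' : k (pvFM k (if k y < k c then y else c) tl) ≤ k (if k y < k c then y else c) :=
      ih _ _ (List.mem_cons_self ..)
    rcases List.mem_cons.mp hx with rfl | hx'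
    · refine le_trans hm' ?_
      split_ifs <;> omega
    · rcases List.mem_cons.mp hx' with rfl | hx''
      · refine le_trans hm' ?_
        split_ifs <;> omega
      · exact ih _ _ (List.mem_cons_of_mem _ hx'')

-- the optional first-minimum B's tournament computes
def pvBest? (k : Int → Int) : List Int → Option Int
  | [] => none
  | c :: l => some (pvFM k c l)

def pvMerge (k : Int → Int) : Option Int → Option Int → Option Int
  | none, r => r
  | some a, none => some a
  | some a, some b => some (if k a ≤ k b then a else b)

theorem pvBest?_append (k : Int → Int) (l1 l2 : List Int) :
    pvBest? k (l1 ++ l2) = pvMerge k (pvBest? k l1) (pvBest? k l2) := by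
  cases l1 with
  | nil => cases l2 <;> rfl
  | cons c1 t1 =>
    cases l2 with
    | nil => simp [pvBest?, pvMerge]
    | cons c2 t2 =>
      simp only [pvBest?, pvMerge, List.cons_append]
      have h1 : pvFM k c1 (t1 ++ c2 :: t2) = pvFM k (pvFM k c1 t1) (c2 :: t2) := by
        unfold pvFM; rw [List.foldl_append]
      rw [h1, pvFM_split]
      by_cases h : k (pvFM k c2 t2) < k (pvFM k c1 t1)
      · rw [if_pos h, if_neg (by omega)]
      · rw [if_neg h, if_pos (by omega)]

-- the arrived processes among indices [s, s+n)
def pvArr (t : Int) (burst : List (Int × List Int)) (e1 : List Int) (s n : Nat) : List Int :=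
  ((List.range' s n).filter (fun i => decide (t ≥ pvB0 burst (pvAt e1 i)))).map (pvAt e1)

theorem pvChampF_eq (t : Int) (burst : List (Int × List Int)) (e1 : List Int) :
    ∀ (fuel : Nat) (lo hi : Int), 0 ≤ lo → (hi - lo).toNat ≤ fuel →
      pvChampF t burst e1 fuel lo hi = pvBest? (pvB1 burst) (pvArr t burst e1 lo.toNat (hi - lo).toNat) := by
  intro fuel
  induction fuel with
  | zero =>
    intro lo hi hlo hle
    have h0 : (hi - lo).toNat = 0 := by omega
    rw [h0]
    rfl
  | succ fuel ih =>
    intro lo hi hlo hle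
    by_cases h0 : hi - lo ≤ 0
    · have hz : (hi - lo).toNat = 0 := by omega
      rw [pvChampF, if_pos h0, hz]
      rfl
    · by_cases h1 : hi - lo = 1
      · rw [pvChampF, if_neg h0, if_pos h1]
        have hd1 : (hi - lo).toNat = 1 := by omega
        rw [hd1]
        have hat : pvAtI e1 lo = pvAt e1 lo.toNat :=
          congrArg (fun z => (PySem.List.pyGet? e1 z).getD 0) (by omega)
        simp only [pvArr, List.range'_one, hat]
        by_cases harr : t ≥ pvB0 burst (pvAt e1 lo.toNat)
        · rw [if_pos harr]
          simp [pvBest?, harr, pvFM_nil]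
        · rw [if_neg harr]
          simp [pvBest?, harr]
      · have hge : 2 ≤ hi - lo := by omega
        have hmid : PySem.Int.floordiv (lo + hi) 2 = (lo + hi) / 2 :=
          PySem.Int.floordiv_eq_ediv_of_pos (by omega)
        rw [pvChampF, if_neg h0, if_neg h1]
        simp only [hmid]
        set mid := (lo + hi) / 2 with hm
        have hb1 : lo < mid := by omega
        have hb2 : mid < hi := by omega
        rw [ih lo mid hlo (by omega), ih mid hi (by omega) (by omega)]
        have hsum : (mid - lo).toNat + (hi - mid).toNat = (hi - lo).toNat := by omega
        have hmt : mid.toNat = lo.toNat + (mid - lo).toNat := by omega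
        have happ : List.range' lo.toNat (hi - lo).toNat = List.range' lo.toNat (mid - lo).toNat ++
            List.range' (lo.toNat + (mid - lo).toNat) (hi - mid).toNat := by
          have h := @List.range'_append lo.toNat (mid - lo).toNat (hi - mid).toNat 1
          simp only [one_mul] at h
          rw [← hsum, ← h]
        have hsplit : pvArr t burst e1 lo.toNat (hi - lo).toNat =
            pvArr t burst e1 lo.toNat (mid - lo).toNat ++ pvArr t burst e1 mid.toNat (hi - mid).toNat := by
          unfold pvArr
          rw [← List.map_append, ← List.filter_append, hmt, ← happ]
        rw [hsplit, pvBest?_append]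
        cases pvBest? (pvB1 burst) (pvArr t burst e1 lo.toNat (mid - lo).toNat) with
        | none => cases pvBest? (pvB1 burst) (pvArr t burst e1 mid.toNat (hi - mid).toNat) <;> rfl
        | some a => cases pvBest? (pvB1 burst) (pvArr t burst e1 mid.toNat (hi - mid).toNat) <;> rfl

theorem pvChamp_eq (t : Int) (burst : List (Int × List Int)) (e1 : List Int) :
    ∀ (d : Nat) (lo hi : Int), 0 ≤ lo → (hi - lo).toNat = d →
      pvChamp t burst e1 lo hi = pvBest? (pvB1 burst) (pvArr t burst e1 lo.toNat d) := by
  intro d lo hi hlo hd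
  unfold pvChamp
  rw [pvChampF_eq t burst e1 _ lo hi hlo (le_refl _), hd]

-- A's selection loop over indices equals the first-minimum loop over the arrived list
theorem foldA_eq (t : Int) (burst : List (Int × List Int)) (e1 : List Int)
    (l : List Nat) (cand : Int) :
    l.foldl (fun cand i =>
      if t ≥ pvB0 burst (pvAt e1 i) then
        if pvB1 burst (pvAt e1 i) < pvB1 burst cand then pvAt e1 i else cand
      else cand) cand
    = pvFM (pvB1 burst) cand
        ((l.filter (fun i => decide (t ≥ pvB0 burst (pvAt e1 i)))).map (pvAt e1)) := by
  induction l generalizing cand with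
  | nil => rfl
  | cons i tl ih =>
    by_cases hi : t ≥ pvB0 burst (pvAt e1 i)
    · simp only [List.foldl_cons, List.filter_cons, hi, decide_true, if_true, List.map_cons,
        pvFM_cons]
      rw [ih]
    · simp only [List.foldl_cons, List.filter_cons, hi, decide_false, if_false, Bool.false_eq_true]
      rw [ih]

-- B's top-level value equals the first minimum over the whole arrived list
theorem KeyAlt_best (count t : Int) (burst : List (Int × List Int)) (e1 : List Int) :
    (if 0 < count then pvChamp t burst e1 0 count else none)
      = pvBest? (pvB1 burst) (((List.range count.toNat).filter
          (fun i => decide (t ≥ pvB0 burst (pvAt e1 i)))).map (pvAt e1)) := by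
  by_cases hc : 0 < count
  · rw [if_pos hc, pvChamp_eq t burst e1 count.toNat 0 count (le_refl 0) (by omega)]
    unfold pvArr
    rw [List.range_eq_range']
    rfl
  · rw [if_neg hc]
    have : count.toNat = 0 := by omega
    rw [this]
    rfl

theorem filter_range_pairwise (p : Nat → Bool) (n : Nat) :
    ((List.range n).filter p).Pairwise (· < ·) :=
  List.Pairwise.sublist List.filter_sublist List.pairwise_lt_range

theorem Key_spec : Claim_unchanged_Key := by
  intro proNo count t burst e1 _hdom _hpre hnd
  unfold Key Key_alt
  simp only []
  set n := count.toNat with hn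
  set arrB : Nat → Bool := fun i => decide (t ≥ pvB0 burst (pvAt e1 i)) with harrB
  set k : Int → Int := fun p => pvB1 burst p with hk
  set fl := (List.range n).filter arrB with hfl
  have hfind : (List.range n).find? arrB = fl.head? := (List.head?_filter ..).symm
  have hpw : fl.Pairwise (· < ·) := by rw [hfl]; exact filter_range_pairwise arrB n
  have hbest : (if 0 < count then pvChamp t burst e1 0 count else none)
      = pvBest? k (fl.map (pvAt e1)) := KeyAlt_best count t burst e1
  by_cases hp : proNo = 99
  · -- A seeds from the first arrived process; B skips the top-level merge
    cases hflc : fl with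
    | nil =>
      -- nobody arrived: both return proNo
      rw [hflc] at hbest
      simp [hp, hfind, hflc, hbest, pvBest?]
    | cons i0 tl =>
      have hi0arr : arrB i0 = true := (List.mem_filter.mp (hflc ▸ (List.mem_cons_self ..))).2
      have hi0n : i0 < n := List.mem_range.mp (List.mem_filter.mp (hflc ▸ (List.mem_cons_self ..))).1
      have hfirst : ∀ j < i0, ¬ t ≥ pvB0 burst (pvAt e1 j) := by
        intro j hj hjarr
        have hjf : j ∈ fl := List.mem_filter.mpr
          ⟨List.mem_range.mpr (lt_trans hj hi0n), by simp [harrB, hjarr]⟩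
        rw [hflc] at hjf
        rcases List.mem_cons.mp hjf with h | h
        · omega
        · have := List.rel_of_pairwise_cons (hflc ▸ hpw) h
          omega
      rw [hflc] at hbest
      simp only [List.map_cons, pvBest?] at hbest
      by_cases h99 : pvAt e1 i0 = 99
      · -- first arrived process is the sentinel value: A returns 99; ¬D says no later
        -- arrived process has a smaller burst, so B's tournament champion is 99 as well
        have hnosmall : ∀ x ∈ tl.map (pvAt e1), ¬ k x < k (99 : Int) := by
          intro x hx hlt
          rcases List.mem_map.mp hx with ⟨j, hj, rfl⟩
          have hjmem : j ∈ fl := hflc ▸ List.mem_cons_of_mem _ hj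
          have hjn : j < n := List.mem_range.mp (List.mem_filter.mp hjmem).1
          have hjarr : arrB j = true := (List.mem_filter.mp hjmem).2
          have hij : i0 < j := List.rel_of_pairwise_cons (hflc ▸ hpw) hj
          exact hnd ⟨hp, i0, hi0n, by simpa [harrB] using hi0arr, h99, hfirst,
            j, hjn, hij, by simpa [harrB] using hjarr, by simpa [hk] using hlt⟩
        have hm99 : pvFM k (99 : Int) (tl.map (pvAt e1)) = 99 :=
          pvFM_stay _ _ _ hnosmall
        rw [hfind, hflc]
        simp only [hp, if_true, List.head?_cons, h99, hbest, hm99]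
        rw [if_neg (by simp)]
        simp
      · -- first arrived process is a real one: both reduce to the first-minimum over arrived
        rw [hfind, hflc]
        simp only [hp, if_true, List.head?_cons]
        rw [if_pos h99, foldA_eq, ← harrB, ← hfl, hflc]
        simp only [List.map_cons, pvFM_cons, if_neg (lt_irrefl _), hbest]
        rw [if_neg (by simp)]
  · -- proNo is a real process: A refines proNo, B merges proNo with the champion
    rw [if_neg hp]
    by_cases hne : proNo = 99
    · exact absurd hne hp
    rw [if_pos hne, foldA_eq, ← harrB, ← hfl]
    cases hflc : fl with
    | nil =>
      rw [hflc] at hbest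
      simp only [List.map_nil, pvBest?] at hbest
      simp [pvFM_nil, hbest, hp]
    | cons i0 tl =>
      rw [hflc] at hbest
      simp only [List.map_cons, pvBest?] at hbest
      simp only [List.map_cons, hbest, if_pos hp]
      rw [pvFM_split]
      unfold pvBetter
      by_cases h : k (pvFM k (pvAt e1 i0) (tl.map (pvAt e1))) < k proNo
      · rw [if_pos h, if_neg (by simp only [hk] at h ⊢; omega)]
      · rw [if_neg h, if_pos (by simp only [hk] at h ⊢; omega)]

theorem Key_changed : Claim_changed_Key := by
  unfold Claim_changed_Key
  refine ⟨by decide, by decide, by decide, by decide, ?_, by decide⟩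
  decide

theorem Key_tight : Claim_exact_Key := by
  intro proNo count t burst e1 _hdom _hpre hd
  obtain ⟨hp, i0, hi0n, hi0arr, h99, hfirst, j, hjn, hij, hjarr, hjlt⟩ := hd
  set n := count.toNat with hn
  set arrB : Nat → Bool := fun i => decide (t ≥ pvB0 burst (pvAt e1 i)) with harrB
  set k : Int → Int := fun p => pvB1 burst p with hk
  set fl := (List.range n).filter arrB with hfl
  have hpw : fl.Pairwise (· < ·) := by rw [hfl]; exact filter_range_pairwise arrB n
  -- fl starts with i0
  have hi0mem : i0 ∈ fl := List.mem_filter.mpr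
    ⟨List.mem_range.mpr hi0n, by simp [harrB, hi0arr]⟩
  obtain ⟨h, tl, hflc⟩ : ∃ h tl, fl = h :: tl := by
    cases hfc : fl with
    | nil => rw [hfc] at hi0mem; simp at hi0mem
    | cons h tl => exact ⟨h, tl, rfl⟩
  have hhead : h = i0 := by
    have hhmem : h ∈ fl := hflc ▸ List.mem_cons_self ..
    have hhn : h < n := List.mem_range.mp (List.mem_filter.mp hhmem).1
    have hharr : arrB h = true := (List.mem_filter.mp hhmem).2
    rcases List.mem_cons.mp (hflc ▸ hi0mem) with h1 | h1
    · omega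
    · have hlt : h < i0 := List.rel_of_pairwise_cons (hflc ▸ hpw) h1
      exact absurd (by simpa [harrB] using hharr) (hfirst h hlt)
  subst hhead
  -- A returns 99
  have hA : Key proNo count t burst e1 = 99 := by
    unfold Key
    rw [hp]
    simp only [if_true, ← hn, (List.head?_filter ..).symm, ← harrB, ← hfl, hflc,
      List.head?_cons, h99]
    rw [if_neg (by simp)]
  -- B returns the tournament champion, an arrived process with burst below 99's
  have hbest : (if 0 < count then pvChamp t burst e1 0 count else none)
      = some (pvFM k (pvAt e1 h) (tl.map (pvAt e1))) := by
    rw [KeyAlt_best count t burst e1, ← harrB, ← hn, ← hfl, hflc]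
    rfl
  set m := pvFM k (pvAt e1 h) (tl.map (pvAt e1)) with hm
  have hB : Key_alt proNo count t burst e1 = m := by
    unfold Key_alt
    simp only [hbest, hp]
    rw [if_neg (by simp)]
  have hjfl : j ∈ fl := List.mem_filter.mpr
    ⟨List.mem_range.mpr hjn, by simp [harrB, hjarr]⟩
  have hjmap : pvAt e1 j ∈ pvAt e1 h :: tl.map (pvAt e1) := by
    rw [← List.map_cons, ← hflc]; exact List.mem_map_of_mem hjfl
  have hmle : k m ≤ k (pvAt e1 j) := pvFM_le k (pvAt e1 h) (tl.map (pvAt e1)) _ hjmap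
  rw [hA, hB]
  intro hcontra
  rw [← hcontra] at hmle
  simp only [hk] at hmle
  omega
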